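-- pv_equiv track=rewrite | github.com/vATCSCC/PERTI | scripts/generate_historical_changelog.py | _versioned_name
-- ===== SOURCE A (Python) =====
-- def _versioned_name(comp_code, proc_name):
--     """Extract versioned procedure name from computer code.
--
--     DP format:   DEEZZ6.DEEZZ  -> DEEZZ6   (version before dot)
--     STAR format: BAINY.BAINY3  -> BAINY3   (version after dot)
--     Intl DP:     BPK5K.BPK     -> BPK5K    (ends with letter, not digit)
--     Intl STAR:   BPK.BPK5K     -> BPK5K    (ends with letter, not digit)
--     Heuristic: pick the part starting with proc_name that contains a digit.
--     Falls back to proc_name.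
--     """
--     if '.' not in comp_code:
--         # No dot: return as-is if it contains a digit, else proc_name
--         return comp_code if any(c.isdigit() for c in comp_code) else proc_name
--     parts = comp_code.split('.', 1)
--     pn = proc_name.upper()
--     # Prefer part starting with proc_name + ending with digit (NASR standard)
--     for p in parts:
--         if p.upper().startswith(pn) and p[-1:].isdigit():
--             return p
--     # Intl pattern: part starting with proc_name + containing digit + longer (BPK5K, AGOP6A)
--     for p in parts:
--         if p.upper().startswith(pn) and any(c.isdigit() for c in p) and len(p) > len(pn):
--             return p
--     # Fallback: any part ending with a digit
--     for p in parts: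
--         if p[-1:].isdigit():
--             return p
--     # Fallback: any part containing a digit and longer than proc_name
--     for p in parts:
--         if any(c.isdigit() for c in p) and len(p) > len(pn):
--             return p
--     return proc_name
-- ===== SOURCE B (Python) =====
-- def _versioned_name(comp_code, proc_name):
--     """Extract versioned procedure name from computer code.
--
--     Single pass: rank each split part by priority (1 best), keep the first
--     part with the lowest rank; fall back to proc_name.
--     """
--     if '.' not in comp_code:
--         return comp_code if any(c.isdigit() for c in comp_code) else proc_name
--     pn = proc_name.upper()
--
--     def rank(p):
--         sw = p.upper().startswith(pn)
--         ed = p[-1:].isdigit()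
--         hd = any(c.isdigit() for c in p)
--         lg = len(p) > len(pn)
--         if sw and ed:
--             return 1
--         if sw and hd and lg:
--             return 2
--         if ed:
--             return 3
--         if hd and lg:
--             return 4
--         return 5
--
--     best, best_rank = proc_name, 5
--     for p in comp_code.split('.', 1):
--         r = rank(p)
--         if r < best_rank:
--             best, best_rank = p, r
--     return best
-- ===== Notes on version B (the rewrite author's own statement) =====
-- stated objective: alternative
-- what changed: A's four sequential priority passes over the split parts are replaced by a single fold that ranks each part once (priority 1..5) and keeps the first part with the lowest rank, falling back to proc_name.
import Mathlib
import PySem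

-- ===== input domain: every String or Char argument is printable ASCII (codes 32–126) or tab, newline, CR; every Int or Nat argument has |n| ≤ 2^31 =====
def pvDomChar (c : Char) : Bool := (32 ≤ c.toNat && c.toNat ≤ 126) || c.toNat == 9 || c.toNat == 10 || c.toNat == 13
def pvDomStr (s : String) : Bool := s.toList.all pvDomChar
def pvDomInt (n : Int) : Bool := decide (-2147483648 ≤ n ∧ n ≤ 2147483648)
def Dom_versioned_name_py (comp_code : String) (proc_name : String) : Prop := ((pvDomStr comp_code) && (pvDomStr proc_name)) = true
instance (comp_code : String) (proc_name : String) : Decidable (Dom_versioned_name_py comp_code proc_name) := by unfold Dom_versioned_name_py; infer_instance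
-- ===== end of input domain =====

-- B replaces A's four ordered scans over the split parts by a single pass that ranks each part
-- (1..5 by priority) and keeps the first part with the lowest rank (objective: alternative decomposition).


-- ===== PORT A =====
-- shared atoms, each a literal port of the Python test it names:
-- p[-1:].isdigit()
def pvLastDigit (p : String) : Bool := PySem.Chars.strIsdigit (PySem.Chars.slice p.toList (some (-1)) none)
-- any(c.isdigit() for c in p)
def pvHasDigit (p : String) : Bool := p.toList.any PySem.Chars.isdigit
-- p.upper().startswith(pn)
def pvSW (pn p : String) : Bool := PySem.Str.startswith (PySem.Str.upper p) pn
-- len(p) > len(pn)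
def pvLG (pn p : String) : Bool := decide (PySem.Str.len pn < PySem.Str.len p)

def versioned_name_py (comp_code : String) (proc_name : String) : String :=
  if PySem.Str.isIn "." comp_code = false then
    (if comp_code.toList.any PySem.Chars.isdigit then comp_code else proc_name)
  else
    let parts := (PySem.Str.splitMax? comp_code "." 1).getD []
    let pn := PySem.Str.upper proc_name
    match parts.find? (fun p => pvSW pn p && pvLastDigit p) with
    | some p => p
    | none =>
      match parts.find? (fun p => pvSW pn p && pvHasDigit p && pvLG pn p) with
      | some p => p
      | none =>
        match parts.find? (fun p => pvLastDigit p) with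
        | some p => p
        | none =>
          match parts.find? (fun p => pvHasDigit p && pvLG pn p) with
          | some p => p
          | none => proc_name

-- ===== PORT B =====
def pvRank (pn p : String) : Nat :=
  if pvSW pn p && pvLastDigit p then 1
  else if pvSW pn p && pvHasDigit p && pvLG pn p then 2
  else if pvLastDigit p then 3
  else if pvHasDigit p && pvLG pn p then 4
  else 5

def versioned_name_py_alt (comp_code : String) (proc_name : String) : String :=
  if PySem.Str.isIn "." comp_code = false then
    (if comp_code.toList.any PySem.Chars.isdigit then comp_code else proc_name)
  else
    let pn := PySem.Str.upper proc_name
    (((PySem.Str.splitMax? comp_code "." 1).getD []).foldl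
      (fun acc p => if pvRank pn p < acc.2 then (p, pvRank pn p) else acc)
      (proc_name, 5)).1

-- ===== PRECONDITION & SPEC =====
def Spec_versioned_name_py (comp_code : String) (proc_name : String) (out : String) : Prop := out = versioned_name_py_alt comp_code proc_name
instance (comp_code : String) (proc_name : String) (out : String) : Decidable (Spec_versioned_name_py comp_code proc_name out) := by unfold Spec_versioned_name_py; infer_instance

-- ===== CLAIM (what is proved, stated in full; the proofs are below) =====
def Claim_equal_versioned_name_py : Prop := ∀ (comp_code : String) (proc_name : String), Dom_versioned_name_py comp_code proc_name → Spec_versioned_name_py comp_code proc_name (versioned_name_py comp_code proc_name)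

-- ===== LEMMAS AND PROOFS =====

theorem pvRank_pos (pn p : String) : 1 ≤ pvRank pn p := by
  unfold pvRank; split_ifs <;> omega

theorem pvRank_eq_one_iff (pn p : String) :
    (pvSW pn p && pvLastDigit p) = true ↔ pvRank pn p = 1 := by
  unfold pvRank; split_ifs <;> simp_all

theorem pvRank_eq_two_iff (pn p : String) (h1 : pvRank pn p ≠ 1) :
    (pvSW pn p && pvHasDigit p && pvLG pn p) = true ↔ pvRank pn p = 2 := by
  unfold pvRank at *; split_ifs at * <;> simp_all

theorem pvRank_eq_three_iff (pn p : String) (h1 : pvRank pn p ≠ 1) (h2 : pvRank pn p ≠ 2) :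
    pvLastDigit p = true ↔ pvRank pn p = 3 := by
  unfold pvRank at *; split_ifs at * <;> simp_all

theorem pvRank_eq_four_iff (pn p : String) (h1 : pvRank pn p ≠ 1) (h2 : pvRank pn p ≠ 2)
    (h3 : pvRank pn p ≠ 3) :
    (pvHasDigit p && pvLG pn p) = true ↔ pvRank pn p = 4 := by
  unfold pvRank at *; split_ifs at * <;> simp_all

theorem pvRank_eq_five (pn p : String) (h1 : pvRank pn p ≠ 1) (h2 : pvRank pn p ≠ 2)
    (h3 : pvRank pn p ≠ 3) (h4 : pvRank pn p ≠ 4) : pvRank pn p = 5 := by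
  unfold pvRank at *; split_ifs at * <;> simp_all

-- fold does not move once no remaining part beats the threshold
theorem fold_no_improve (pn : String) (l : List String) (b0 : String) (r0 : Nat)
    (h : ∀ p ∈ l, ¬ pvRank pn p < r0) :
    l.foldl (fun acc p => if pvRank pn p < acc.2 then (p, pvRank pn p) else acc) (b0, r0)
      = (b0, r0) := by
  induction l with
  | nil => rfl
  | cons q t ih =>
      simp only [List.foldl_cons]
      rw [if_neg (h q (List.mem_cons_self))]
      exact ih (fun p hp => h p (List.mem_cons_of_mem _ hp))

-- the threshold stays above any common lower bound of the ranks
theorem fold_threshold_lb (pn : String) (l : List String) (b0 : String) (r0 m : Nat)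
    (hr : m ≤ r0) (h : ∀ p ∈ l, m ≤ pvRank pn p) :
    m ≤ (l.foldl (fun acc p => if pvRank pn p < acc.2 then (p, pvRank pn p) else acc) (b0, r0)).2 := by
  induction l generalizing b0 r0 with
  | nil => exact hr
  | cons q t ih =>
      simp only [List.foldl_cons]
      by_cases hq : pvRank pn q < r0
      · rw [if_pos hq]
        exact ih q (pvRank pn q) (h q List.mem_cons_self) (fun p hp => h p (List.mem_cons_of_mem _ hp))
      · rw [if_neg hq]
        exact ih b0 r0 hr (fun p hp => h p (List.mem_cons_of_mem _ hp))

-- once an element of minimal rank k is taken, the fold over the rest returns it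
theorem fold_after_hit (pn : String) (l : List String) (p : String) (k : Nat)
    (h : ∀ q ∈ l, k ≤ pvRank pn q) :
    (l.foldl (fun acc q => if pvRank pn q < acc.2 then (q, pvRank pn q) else acc) (p, k)).1 = p := by
  rw [fold_no_improve pn l p k (fun q hq => by have := h q hq; omega)]

-- main lemma: A's four ordered passes pick the first part of minimal rank = B's single fold
theorem chain_eq_fold (pn b0 : String) (parts : List String) :
    (match parts.find? (fun p => pvSW pn p && pvLastDigit p) with
     | some p => p
     | none =>
       match parts.find? (fun p => pvSW pn p && pvHasDigit p && pvLG pn p) with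
       | some p => p
       | none =>
         match parts.find? (fun p => pvLastDigit p) with
         | some p => p
         | none =>
           match parts.find? (fun p => pvHasDigit p && pvLG pn p) with
           | some p => p
           | none => b0)
    = (parts.foldl (fun acc p => if pvRank pn p < acc.2 then (p, pvRank pn p) else acc) (b0, 5)).1 := by
  -- general step: if pass k hits part p and every earlier part has rank > k
  -- while every part anywhere has rank ≥ k, the fold returns p
  have key : ∀ (p : String) (k : Nat) (l1 l2 : List String),
      parts = l1 ++ p :: l2 → pvRank pn p = k → 1 ≤ k → k ≤ 4 →
      (∀ q ∈ l1, k < pvRank pn q) → (∀ q ∈ parts, k ≤ pvRank pn q) →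
      (parts.foldl (fun acc p => if pvRank pn p < acc.2 then (p, pvRank pn p) else acc) (b0, 5)).1 = p := by
    intro p k l1 l2 hsplit hk hk1 hk5 hrank hall
    subst hsplit
    rw [List.foldl_append, List.foldl_cons]
    have hlb : k + 1 ≤ (l1.foldl (fun acc p => if pvRank pn p < acc.2 then (p, pvRank pn p) else acc) (b0, 5)).2 := by
      exact fold_threshold_lb pn l1 b0 5 (k+1) (by omega) (fun q hq => hrank q hq)
    have hcond : pvRank pn p < (l1.foldl (fun acc p => if pvRank pn p < acc.2 then (p, pvRank pn p) else acc) (b0, 5)).2 := by omega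
    rw [if_pos hcond, hk]
    exact fold_after_hit pn l2 p k (fun q hq => hall q (by simp [hq]))
  rcases h1 : parts.find? (fun p => pvSW pn p && pvLastDigit p) with _ | p1
  case some =>
    -- pass 1 hit: rank 1, earlier parts fail the pass-1 test so have rank > 1
    rw [List.find?_eq_some_iff_append] at h1
    obtain ⟨hc, l1, l2, hsplit, hpre⟩ := h1
    have hk : pvRank pn p1 = 1 := (pvRank_eq_one_iff pn p1).mp hc
    simp only []
    refine (key p1 1 l1 l2 hsplit hk le_rfl (by omega) ?_ ?_).symm
    · intro q hq
      have := hpre q hq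
      have hne : pvRank pn q ≠ 1 := fun h => by
        rw [← pvRank_eq_one_iff] at h; simp [h] at this
      have := pvRank_pos pn q; omega
    · intro q _; exact pvRank_pos pn q
  case none =>
    have no1 : ∀ q ∈ parts, pvRank pn q ≠ 1 := by
      intro q hq h
      have := List.find?_eq_none.mp h1 q hq
      rw [← pvRank_eq_one_iff] at h; simp [h] at this
    rcases h2 : parts.find? (fun p => pvSW pn p && pvHasDigit p && pvLG pn p) with _ | p2
    case some =>
      rw [List.find?_eq_some_iff_append] at h2
      obtain ⟨hc, l1, l2, hsplit, hpre⟩ := h2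
      have hmem : p2 ∈ parts := by rw [hsplit]; simp
      have hk : pvRank pn p2 = 2 := (pvRank_eq_two_iff pn p2 (no1 p2 hmem)).mp hc
      simp only []
      refine (key p2 2 l1 l2 hsplit hk (by omega) (by omega) ?_ ?_).symm
      · intro q hq
        have hqm : q ∈ parts := by rw [hsplit]; exact List.mem_append_left _ hq
        have := hpre q hq
        have hne2 : pvRank pn q ≠ 2 := fun h => by
          rw [← pvRank_eq_two_iff pn q (no1 q hqm)] at h; simp [h] at this
        have := pvRank_pos pn q
        have := no1 q hqm; omega
      · intro q hq
        have := pvRank_pos pn q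
        have := no1 q hq; omega
    case none =>
      have no2 : ∀ q ∈ parts, pvRank pn q ≠ 2 := by
        intro q hq h
        have := List.find?_eq_none.mp h2 q hq
        rw [← pvRank_eq_two_iff pn q (no1 q hq)] at h; simp [h] at this
      rcases h3 : parts.find? (fun p => pvLastDigit p) with _ | p3
      case some =>
        rw [List.find?_eq_some_iff_append] at h3
        obtain ⟨hc, l1, l2, hsplit, hpre⟩ := h3
        have hmem : p3 ∈ parts := by rw [hsplit]; simp
        have hk : pvRank pn p3 = 3 := (pvRank_eq_three_iff pn p3 (no1 p3 hmem) (no2 p3 hmem)).mp hc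
        simp only []
        refine (key p3 3 l1 l2 hsplit hk (by omega) (by omega) ?_ ?_).symm
        · intro q hq
          have hqm : q ∈ parts := by rw [hsplit]; exact List.mem_append_left _ hq
          have := hpre q hq
          have hne3 : pvRank pn q ≠ 3 := fun h => by
            rw [← pvRank_eq_three_iff pn q (no1 q hqm) (no2 q hqm)] at h; simp [h] at this
          have := pvRank_pos pn q
          have := no1 q hqm; have := no2 q hqm; omega
        · intro q hq
          have := pvRank_pos pn q
          have := no1 q hq; have := no2 q hq; omega
      case none =>
        have no3 : ∀ q ∈ parts, pvRank pn q ≠ 3 := by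
          intro q hq h
          have := List.find?_eq_none.mp h3 q hq
          rw [← pvRank_eq_three_iff pn q (no1 q hq) (no2 q hq)] at h; simp [h] at this
        rcases h4 : parts.find? (fun p => pvHasDigit p && pvLG pn p) with _ | p4
        case some =>
          rw [List.find?_eq_some_iff_append] at h4
          obtain ⟨hc, l1, l2, hsplit, hpre⟩ := h4
          have hmem : p4 ∈ parts := by rw [hsplit]; simp
          have hk : pvRank pn p4 = 4 :=
            (pvRank_eq_four_iff pn p4 (no1 p4 hmem) (no2 p4 hmem) (no3 p4 hmem)).mp hc
          simp only []
          refine (key p4 4 l1 l2 hsplit hk (by omega) (by omega) ?_ ?_).symm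
          · intro q hq
            have hqm : q ∈ parts := by rw [hsplit]; exact List.mem_append_left _ hq
            have := hpre q hq
            have hne4 : pvRank pn q ≠ 4 := fun h => by
              rw [← pvRank_eq_four_iff pn q (no1 q hqm) (no2 q hqm) (no3 q hqm)] at h
              simp [h] at this
            have := pvRank_pos pn q
            have := no1 q hqm; have := no2 q hqm; have := no3 q hqm; omega
          · intro q hq
            have := pvRank_pos pn q
            have := no1 q hq; have := no2 q hq; have := no3 q hq; omega
        case none =>
          have no4 : ∀ q ∈ parts, pvRank pn q ≠ 4 := by
            intro q hq h
            have := List.find?_eq_none.mp h4 q hq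
            rw [← pvRank_eq_four_iff pn q (no1 q hq) (no2 q hq) (no3 q hq)] at h
            simp [h] at this
          have all5 : ∀ q ∈ parts, pvRank pn q = 5 := fun q hq =>
            pvRank_eq_five pn q (no1 q hq) (no2 q hq) (no3 q hq) (no4 q hq)
          simp only []
          rw [fold_no_improve pn parts b0 5 (fun q hq => by have := all5 q hq; omega)]

-- ===== VERDICT (by name: the statement is the Claim_ definition above) =====
theorem versioned_name_py_spec : Claim_equal_versioned_name_py := by
  intro comp_code proc_name _
  unfold Spec_versioned_name_py versioned_name_py versioned_name_py_alt
  by_cases h : PySem.Str.isIn "." comp_code = false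
  · rw [if_pos h, if_pos h]
  · rw [if_neg h, if_neg h]
    exact chain_eq_fold (PySem.Str.upper proc_name) proc_name _
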